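-- pv_equiv track=rewrite | github.com/kingsley-011/Smart-Cart | smart_cart_app/base/utils.py | get_invoice
-- ===== SOURCE A (Python) =====
-- def get_invoice(adding_items : dict, removing_items : dict) -> dict:
--     add_dict, remove_dict = {}, {}
--     for _, item_dict in adding_items.items():
--         add_dict[item_dict['product']] = item_dict['uid']
--     for _, item_dict in removing_items.items():
--         remove_dict[item_dict['product']] = item_dict['uid']
--     final_structure = {}
--     for name, uid in add_dict.items():
--         final_structure[name] = final_structure.get(name, 0) + 1
--     for name, uid in remove_dict.items():
--         try:
--             final_structure[name] = final_structure.get(name) - 1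
--         except:
--             pass
--     return final_structure
-- ===== SOURCE B (Python) =====
-- def get_invoice(adding_items: dict, removing_items: dict) -> dict:
--     def index(items: dict) -> dict:
--         return {item_dict['product']: item_dict['uid'] for item_dict in items.values()}
--     add = index(adding_items)
--     remove = index(removing_items)
--     return {name: 0 if name in remove else 1 for name in add}
-- ===== Notes on version B (the rewrite author's own statement) =====
-- stated objective: simpler
-- what changed: Replaced A's +1/-1 accumulator dict and try/except-as-control-flow by two dict comprehensions indexing products and one comprehension deciding each value directly by membership in the removed index; Pre_ only excludes KeyError inputs (missing 'product'/'uid') and association lists with duplicate keys, which represent no Python dict faithfully.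
import Mathlib
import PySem

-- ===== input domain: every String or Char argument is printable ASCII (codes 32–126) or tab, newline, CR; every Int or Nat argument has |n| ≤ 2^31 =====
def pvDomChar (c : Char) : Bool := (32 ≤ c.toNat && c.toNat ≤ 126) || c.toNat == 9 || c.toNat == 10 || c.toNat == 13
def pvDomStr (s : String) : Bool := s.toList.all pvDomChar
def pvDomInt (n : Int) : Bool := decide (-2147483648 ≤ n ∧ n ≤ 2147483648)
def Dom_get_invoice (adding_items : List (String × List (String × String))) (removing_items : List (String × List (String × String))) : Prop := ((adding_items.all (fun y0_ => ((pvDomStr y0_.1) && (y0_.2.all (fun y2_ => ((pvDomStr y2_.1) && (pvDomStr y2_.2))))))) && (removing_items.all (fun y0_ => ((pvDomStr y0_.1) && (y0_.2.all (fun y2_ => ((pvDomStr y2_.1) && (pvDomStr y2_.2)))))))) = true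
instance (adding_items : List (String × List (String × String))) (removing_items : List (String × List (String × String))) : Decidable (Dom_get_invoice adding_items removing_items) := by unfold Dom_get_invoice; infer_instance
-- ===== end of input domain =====

-- B replaces A's +1/-1 accumulator with try/except control flow by two product->uid
-- indexes and a single membership-test comprehension (simpler, same cost).
-- Pre_ excludes inputs where Python A raises KeyError (an item without 'product' or 'uid')
-- and association lists with duplicate keys, which do not represent any Python dict faithfully.

-- ===== PORT A =====
-- item_dict['product'] / ['uid']: KeyError when absent; Pre_ guarantees presence, so the
-- "" default is never reached on admitted inputs.
def pvKey (item : List (String × String)) (k : String) : String :=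
  (PySem.Dict.mk item).getD k ""

def get_invoice (adding_items : List (String × List (String × String))) (removing_items : List (String × List (String × String))) : List (String × Int) :=
  let add_dict : PySem.Dict String String :=
    adding_items.foldl (fun d p => d.insert (pvKey p.2 "product") (pvKey p.2 "uid")) PySem.Dict.empty
  let remove_dict : PySem.Dict String String :=
    removing_items.foldl (fun d p => d.insert (pvKey p.2 "product") (pvKey p.2 "uid")) PySem.Dict.empty
  let fs1 : PySem.Dict String Int :=
    add_dict.items.foldl (fun fs p => fs.insert p.1 (fs.getD p.1 0 + 1)) PySem.Dict.empty
  -- 'try: final_structure[name] = final_structure.get(name) - 1 except: pass':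
  -- get gives None when absent, None - 1 raises, caught → unchanged
  let fs2 : PySem.Dict String Int :=
    remove_dict.items.foldl (fun fs p => match fs.get? p.1 with
      | some v => fs.insert p.1 (v - 1)
      | none => fs) fs1
  fs2.items

-- ===== PORT B =====
-- helper 'index' of Source B
def pvIndex (items : List (String × List (String × String))) : PySem.Dict String String :=
  items.foldl (fun d p => d.insert (pvKey p.2 "product") (pvKey p.2 "uid")) PySem.Dict.empty

def get_invoice_alt (adding_items : List (String × List (String × String))) (removing_items : List (String × List (String × String))) : List (String × Int) :=
  let add := pvIndex adding_items
  let remove := pvIndex removing_items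
  (add.items.foldl (fun out p => out.insert p.1 (if remove.contains p.1 then 0 else 1))
    (PySem.Dict.empty : PySem.Dict String Int)).items

-- ===== PRECONDITION & SPEC =====
-- Excludes: items missing 'product' or 'uid' (Python A raises KeyError there), and duplicate
-- keys in the outer lists or inside an item (such association lists represent no Python dict
-- faithfully under the insertion-order convention).
def Pre_get_invoice (adding_items : List (String × List (String × String))) (removing_items : List (String × List (String × String))) : Prop :=
  (adding_items.map (·.1)).Nodup ∧ (removing_items.map (·.1)).Nodup ∧
  ∀ p ∈ adding_items ++ removing_items,
    (p.2.map (·.1)).Nodup ∧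
    (PySem.Dict.mk p.2).contains "product" = true ∧
    (PySem.Dict.mk p.2).contains "uid" = true
instance (adding_items : List (String × List (String × String))) (removing_items : List (String × List (String × String))) : Decidable (Pre_get_invoice adding_items removing_items) := by unfold Pre_get_invoice; infer_instance

def pvWitness_get_invoice : (List (String × List (String × String))) × (List (String × List (String × String))) :=
  ([("k1", [("product", "apple"), ("uid", "u1")]), ("k2", [("product", "pear"), ("uid", "u2")])],
   [("r1", [("product", "apple"), ("uid", "u3")])])

def Spec_get_invoice (adding_items : List (String × List (String × String))) (removing_items : List (String × List (String × String))) (out : List (String × Int)) : Prop := out = get_invoice_alt adding_items removing_items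
instance (adding_items : List (String × List (String × String))) (removing_items : List (String × List (String × String))) (out : List (String × Int)) : Decidable (Spec_get_invoice adding_items removing_items out) := by unfold Spec_get_invoice; infer_instance

-- ===== CLAIM (what is proved, stated in full; the proofs are below) =====
def Claim_equal_get_invoice : Prop := ∀ (adding_items : List (String × List (String × String))) (removing_items : List (String × List (String × String))), Dom_get_invoice adding_items removing_items → Pre_get_invoice adding_items removing_items → Spec_get_invoice adding_items removing_items (get_invoice adding_items removing_items)

-- ===== LEMMAS AND PROOFS =====

-- A's first loop over add_dict.items only reads the key, so it is Counter(add_dict.keys)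
lemma fs1_eq_counter (add : PySem.Dict String String) :
    add.items.foldl (fun fs p => fs.insert p.1 (fs.getD p.1 0 + 1)) (PySem.Dict.empty : PySem.Dict String Int)
      = PySem.Dict.counter add.keys := by
  rw [← PySem.Dict.foldl_insert_getD_add_one_eq_counter]
  show _ = List.foldl _ _ (add.items.map (·.1))
  rw [List.foldl_map]

-- A's second loop decrements exactly the keys of fs that occur among l's keys (each once)
lemma items_dec_loop (l : List (String × String)) (fs : PySem.Dict String Int)
    (hl : (l.map (·.1)).Nodup) (hfs : fs.keys.Nodup) :
    (l.foldl (fun fs p => match fs.get? p.1 with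
      | some v => fs.insert p.1 (v - 1)
      | none => fs) fs).items
    = fs.items.map (fun q => (q.1, if q.1 ∈ l.map (·.1) then q.2 - 1 else q.2)) := by
  induction l generalizing fs with
  | nil => simp
  | cons hd t ih =>
    simp only [List.map_cons, List.nodup_cons] at hl
    simp only [List.foldl_cons, List.map_cons]
    cases h : fs.get? hd.1 with
    | none =>
      rw [ih fs hl.2 hfs]
      refine List.map_congr_left (fun q hq => ?_)
      have hne : q.1 ≠ hd.1 := by
        intro e
        have hm := PySem.Dict.mem_keys_of_mem_items fs hq
        rw [PySem.Dict.get?_eq_none_iff_not_mem_keys] at h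
        exact h (e ▸ hm)
      have hiff : (q.1 ∈ hd.1 :: List.map (fun x => x.1) t) ↔ q.1 ∈ List.map (fun x => x.1) t := by
        simp [hne]
      simp only [hiff]
    | some v =>
      have hc : fs.contains hd.1 = true := by
        rw [PySem.Dict.contains_eq_isSome_get?, h]; rfl
      have hk' : (fs.insert hd.1 (v - 1)).keys = fs.keys :=
        PySem.Dict.keys_insert_of_contains fs _ hc
      rw [ih (fs.insert hd.1 (v - 1)) hl.2 (hk' ▸ hfs),
        PySem.Dict.items_insert_of_contains fs _ hc, List.map_map]
      refine List.map_congr_left (fun q hq => ?_)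
      dsimp only [Function.comp]
      by_cases e : q.1 = hd.1
      · have hv : q.2 = v := by
          have hg : fs.get? q.1 = some q.2 :=
            PySem.Dict.get?_of_mem_items fs (by simpa using hq) hfs
          rw [e, h] at hg
          exact (Option.some.injEq _ _).mp hg.symm
        have hnt : hd.1 ∉ t.map (·.1) := hl.1
        simp [e, hv, hnt, List.mem_cons]
      · have hb : (q.1 == hd.1) = false := by simpa using e
        have hiff : (q.1 ∈ hd.1 :: List.map (fun x => x.1) t) ↔ q.1 ∈ List.map (fun x => x.1) t := by
          simp [e]
        have hX : (if (q.1 == hd.1) = true then (hd.1, v - 1) else q) = q := by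
          rw [hb]; simp
        show ((if (q.1 == hd.1) = true then (hd.1, v - 1) else q).1,
              if (if (q.1 == hd.1) = true then (hd.1, v - 1) else q).1 ∈ List.map (fun x => x.1) t
              then (if (q.1 == hd.1) = true then (hd.1, v - 1) else q).2 - 1
              else (if (q.1 == hd.1) = true then (hd.1, v - 1) else q).2)
            = (q.1, if q.1 ∈ hd.1 :: List.map (fun x => x.1) t then q.2 - 1 else q.2)
        rw [hX]
        simp only [hiff]

-- the whole computation, over arbitrary already-built indexes with unique keys
lemma core (add rem : PySem.Dict String String) (ha : add.keys.Nodup) (hr : rem.keys.Nodup) :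
    (rem.items.foldl (fun fs p => match fs.get? p.1 with
        | some v => fs.insert p.1 (v - 1)
        | none => fs)
      (add.items.foldl (fun fs p => fs.insert p.1 (fs.getD p.1 0 + 1)) (PySem.Dict.empty : PySem.Dict String Int))).items
    = (add.items.foldl (fun out p => out.insert p.1 (if rem.contains p.1 then 0 else 1)) (PySem.Dict.empty : PySem.Dict String Int)).items := by
  rw [fs1_eq_counter add,
    items_dec_loop rem.items _ hr (PySem.Dict.nodup_keys_counter _),
    PySem.Dict.items_counter, List.map_map,
    PySem.Set.ofList_eq_self_of_nodup _ ha,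
    PySem.Dict.items_foldl_insert_fresh add.items (·.1) _ PySem.Dict.empty (by simp) ha]
  show List.map _ (add.items.map (·.1)) = _
  rw [List.map_map]
  rw [show (PySem.Dict.empty : PySem.Dict String Int).items = [] from rfl, List.nil_append]
  refine List.map_congr_left (fun p hp => ?_)
  dsimp only [Function.comp]
  have hm : p.1 ∈ add.keys := List.mem_map_of_mem hp
  have hcnt : List.count p.1 add.keys = 1 := List.count_eq_one_of_mem ha hm
  have hcont : rem.contains p.1 = decide (p.1 ∈ rem.keys) :=
    PySem.Dict.contains_eq_decide_mem_keys rem p.1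
  have hkeys : List.map (fun x : String × String => x.1) rem.items = rem.keys := rfl
  rw [hcont]
  simp only [decide_eq_true_eq]
  by_cases hmem : p.1 ∈ rem.keys
  · rw [if_pos (hkeys ▸ hmem : p.1 ∈ List.map _ rem.items), if_pos hmem, hcnt]
    norm_num
  · rw [if_neg (fun hx => hmem (hkeys ▸ hx)), if_neg hmem, hcnt]
    norm_num

lemma nodup_pvIndex (l : List (String × List (String × String))) : (pvIndex l).keys.Nodup := by
  unfold pvIndex
  exact PySem.Dict.nodup_keys_foldl_insert_key l (fun p => pvKey p.2 "product")
    (fun _ p => pvKey p.2 "uid") PySem.Dict.empty (by simp)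

-- ===== VERDICT (by name: the statement is the Claim_ definition above) =====
theorem get_invoice_spec : Claim_equal_get_invoice := by
  intro a r _ _
  show get_invoice a r = get_invoice_alt a r
  unfold get_invoice get_invoice_alt pvIndex
  exact core _ _ (nodup_pvIndex a) (nodup_pvIndex r)
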